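-- pv_equiv track=rewrite | github.com/raghav-273/cognisight-nlp-personality-analyzer | analyzer.py | _analyze_pronouns
-- ===== SOURCE A (Python) =====
-- from typing import Dict, List, Tuple, Optional, Union
--
-- def _analyze_pronouns(words: List[str]) -> Dict[str, int]:
--     """Analyze pronoun usage in text."""
--     first_person_singular = sum(1 for w in words if w in ['i', 'me', 'my', 'mine', 'myself'])
--     first_person_plural = sum(1 for w in words if w in ['we', 'us', 'our', 'ours', 'ourselves'])
--     second_person = sum(1 for w in words if w in ['you', 'your', 'yours', 'yourself', 'yourselves'])
--     third_person = sum(1 for w in words if w in ['he', 'him', 'his', 'she', 'her', 'hers', 'they', 'them', 'their', 'theirs', 'themselves', 'it', 'its'])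
--
--     return {
--         "first_person_singular": first_person_singular,
--         "first_person_plural": first_person_plural,
--         "second_person": second_person,
--         "third_person": third_person
--     }
-- ===== SOURCE B (Python) =====
-- _PRONOUN_CATEGORY = {
--     'i': 'first_person_singular', 'me': 'first_person_singular',
--     'my': 'first_person_singular', 'mine': 'first_person_singular',
--     'myself': 'first_person_singular',
--     'we': 'first_person_plural', 'us': 'first_person_plural',
--     'our': 'first_person_plural', 'ours': 'first_person_plural',
--     'ourselves': 'first_person_plural',
--     'you': 'second_person', 'your': 'second_person', 'yours': 'second_person',
--     'yourself': 'second_person', 'yourselves': 'second_person',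
--     'he': 'third_person', 'him': 'third_person', 'his': 'third_person',
--     'she': 'third_person', 'her': 'third_person', 'hers': 'third_person',
--     'they': 'third_person', 'them': 'third_person', 'their': 'third_person',
--     'theirs': 'third_person', 'themselves': 'third_person',
--     'it': 'third_person', 'its': 'third_person',
-- }
--
-- def _analyze_pronouns(words):
--     counts = {
--         "first_person_singular": 0,
--         "first_person_plural": 0,
--         "second_person": 0,
--         "third_person": 0,
--     }
--     for w in words:
--         cat = _PRONOUN_CATEGORY.get(w)
--         if cat is not None:
--             counts[cat] += 1
--     return counts
-- ===== Notes on version B (the rewrite author's own statement) =====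
-- stated objective: faster
-- what changed: Replaces A's four separate membership-scan passes over the word list with a single pass that looks each word up in a precomputed pronoun-to-category dict and increments the matching counter.
import Mathlib
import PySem

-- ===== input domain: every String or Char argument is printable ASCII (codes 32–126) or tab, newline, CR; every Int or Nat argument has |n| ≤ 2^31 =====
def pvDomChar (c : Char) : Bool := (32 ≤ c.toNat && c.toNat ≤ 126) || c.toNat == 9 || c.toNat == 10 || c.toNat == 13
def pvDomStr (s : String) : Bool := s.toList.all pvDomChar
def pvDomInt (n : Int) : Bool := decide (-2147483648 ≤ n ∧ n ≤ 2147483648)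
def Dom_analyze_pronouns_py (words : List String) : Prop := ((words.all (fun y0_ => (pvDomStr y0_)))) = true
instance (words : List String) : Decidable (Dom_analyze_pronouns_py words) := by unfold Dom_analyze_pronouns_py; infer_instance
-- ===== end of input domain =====

-- B replaces A's four membership-scan passes by one pass looking each word up in a pronoun→category dict (idiomatic; same cost class).

-- ===== PORT A =====
-- literal transliteration of A: four `sum(1 for w in words if w in [...])` passes, then the result dict
def analyze_pronouns_py (words : List String) : List (String × Int) :=
  let first_person_singular : Int :=
    (words.map (fun w => if w ∈ ["i", "me", "my", "mine", "myself"] then (1 : Int) else 0)).sum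
  let first_person_plural : Int :=
    (words.map (fun w => if w ∈ ["we", "us", "our", "ours", "ourselves"] then (1 : Int) else 0)).sum
  let second_person : Int :=
    (words.map (fun w => if w ∈ ["you", "your", "yours", "yourself", "yourselves"] then (1 : Int) else 0)).sum
  let third_person : Int :=
    (words.map (fun w => if w ∈ ["he", "him", "his", "she", "her", "hers", "they", "them", "their", "theirs", "themselves", "it", "its"] then (1 : Int) else 0)).sum
  [("first_person_singular", first_person_singular),
   ("first_person_plural", first_person_plural),
   ("second_person", second_person),
   ("third_person", third_person)]

-- ===== PORT B =====
-- the module-level pronoun→category dict of Source B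
def pronounMap : PySem.Dict String String := PySem.Dict.ofList
  [("i", "first_person_singular"),
   ("me", "first_person_singular"),
   ("my", "first_person_singular"),
   ("mine", "first_person_singular"),
   ("myself", "first_person_singular"),
   ("we", "first_person_plural"),
   ("us", "first_person_plural"),
   ("our", "first_person_plural"),
   ("ours", "first_person_plural"),
   ("ourselves", "first_person_plural"),
   ("you", "second_person"),
   ("your", "second_person"),
   ("yours", "second_person"),
   ("yourself", "second_person"),
   ("yourselves", "second_person"),
   ("he", "third_person"),
   ("him", "third_person"),
   ("his", "third_person"),
   ("she", "third_person"),
   ("her", "third_person"),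
   ("hers", "third_person"),
   ("they", "third_person"),
   ("them", "third_person"),
   ("their", "third_person"),
   ("theirs", "third_person"),
   ("themselves", "third_person"),
   ("it", "third_person"),
   ("its", "third_person")]

-- one loop iteration: cat = _PRONOUN_CATEGORY.get(w); if cat is not None: counts[cat] += 1
def pronounStep (counts : PySem.Dict String Int) (w : String) : PySem.Dict String Int :=
  match pronounMap.get? w with
  | some cat => counts.modify cat 0 (· + 1)
  | none => counts

def analyze_pronouns_py_alt (words : List String) : List (String × Int) :=
  (words.foldl pronounStep
    (PySem.Dict.ofList
      [("first_person_singular", 0), ("first_person_plural", 0),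
       ("second_person", 0), ("third_person", 0)])).items

-- ===== PRECONDITION & SPEC =====
def Spec_analyze_pronouns_py (words : List String) (out : List (String × Int)) : Prop := out = analyze_pronouns_py_alt words
instance (words : List String) (out : List (String × Int)) : Decidable (Spec_analyze_pronouns_py words out) := by unfold Spec_analyze_pronouns_py; infer_instance

-- ===== CLAIM (what is proved, stated in full; the proofs are below) =====
def Claim_equal_analyze_pronouns_py : Prop := ∀ (words : List String), Dom_analyze_pronouns_py words → Spec_analyze_pronouns_py words (analyze_pronouns_py words)

-- ===== LEMMAS AND PROOFS =====

-- one step of B's loop on a dict of the invariant shape, expressed through A's membership tests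
set_option maxHeartbeats 2000000 in
theorem pronounStep_lit (w : String) (a b c d : Int) :
    pronounStep (PySem.Dict.mk
      [("first_person_singular", a), ("first_person_plural", b),
       ("second_person", c), ("third_person", d)]) w =
    PySem.Dict.mk
      [("first_person_singular", a + (if w ∈ ["i", "me", "my", "mine", "myself"] then (1 : Int) else 0)),
       ("first_person_plural", b + (if w ∈ ["we", "us", "our", "ours", "ourselves"] then (1 : Int) else 0)),
       ("second_person", c + (if w ∈ ["you", "your", "yours", "yourself", "yourselves"] then (1 : Int) else 0)),
       ("third_person", d + (if w ∈ ["he", "him", "his", "she", "her", "hers", "they", "them", "their", "theirs", "themselves", "it", "its"] then (1 : Int) else 0))] := by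
  by_cases h1 : w ∈ ["i", "me", "my", "mine", "myself"]
  · simp only [List.mem_cons, List.not_mem_nil, or_false] at h1
    rcases h1 with rfl | rfl | rfl | rfl | rfl <;>
    (unfold pronounStep
     first
      | rw [show pronounMap.get? "i" = some "first_person_singular" from by decide]
      | rw [show pronounMap.get? "me" = some "first_person_singular" from by decide]
      | rw [show pronounMap.get? "my" = some "first_person_singular" from by decide]
      | rw [show pronounMap.get? "mine" = some "first_person_singular" from by decide]
      | rw [show pronounMap.get? "myself" = some "first_person_singular" from by decide]
     simp [PySem.Dict.modify, PySem.Dict.getD, PySem.Dict.get?, PySem.Dict.insert, PySem.Dict.contains])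
  by_cases h2 : w ∈ ["we", "us", "our", "ours", "ourselves"]
  · simp only [List.mem_cons, List.not_mem_nil, or_false] at h2
    rcases h2 with rfl | rfl | rfl | rfl | rfl <;>
    (unfold pronounStep
     first
      | rw [show pronounMap.get? "we" = some "first_person_plural" from by decide]
      | rw [show pronounMap.get? "us" = some "first_person_plural" from by decide]
      | rw [show pronounMap.get? "our" = some "first_person_plural" from by decide]
      | rw [show pronounMap.get? "ours" = some "first_person_plural" from by decide]
      | rw [show pronounMap.get? "ourselves" = some "first_person_plural" from by decide]
     simp [PySem.Dict.modify, PySem.Dict.getD, PySem.Dict.get?, PySem.Dict.insert, PySem.Dict.contains])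
  by_cases h3 : w ∈ ["you", "your", "yours", "yourself", "yourselves"]
  · simp only [List.mem_cons, List.not_mem_nil, or_false] at h3
    rcases h3 with rfl | rfl | rfl | rfl | rfl <;>
    (unfold pronounStep
     first
      | rw [show pronounMap.get? "you" = some "second_person" from by decide]
      | rw [show pronounMap.get? "your" = some "second_person" from by decide]
      | rw [show pronounMap.get? "yours" = some "second_person" from by decide]
      | rw [show pronounMap.get? "yourself" = some "second_person" from by decide]
      | rw [show pronounMap.get? "yourselves" = some "second_person" from by decide]
     simp [PySem.Dict.modify, PySem.Dict.getD, PySem.Dict.get?, PySem.Dict.insert, PySem.Dict.contains])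
  by_cases h4 : w ∈ ["he", "him", "his", "she", "her", "hers", "they", "them", "their", "theirs", "themselves", "it", "its"]
  · simp only [List.mem_cons, List.not_mem_nil, or_false] at h4
    rcases h4 with rfl | rfl | rfl | rfl | rfl | rfl | rfl | rfl | rfl | rfl | rfl | rfl | rfl <;>
    (unfold pronounStep
     first
      | rw [show pronounMap.get? "he" = some "third_person" from by decide]
      | rw [show pronounMap.get? "him" = some "third_person" from by decide]
      | rw [show pronounMap.get? "his" = some "third_person" from by decide]
      | rw [show pronounMap.get? "she" = some "third_person" from by decide]
      | rw [show pronounMap.get? "her" = some "third_person" from by decide]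
      | rw [show pronounMap.get? "hers" = some "third_person" from by decide]
      | rw [show pronounMap.get? "they" = some "third_person" from by decide]
      | rw [show pronounMap.get? "them" = some "third_person" from by decide]
      | rw [show pronounMap.get? "their" = some "third_person" from by decide]
      | rw [show pronounMap.get? "theirs" = some "third_person" from by decide]
      | rw [show pronounMap.get? "themselves" = some "third_person" from by decide]
      | rw [show pronounMap.get? "it" = some "third_person" from by decide]
      | rw [show pronounMap.get? "its" = some "third_person" from by decide]
     simp [PySem.Dict.modify, PySem.Dict.getD, PySem.Dict.get?, PySem.Dict.insert, PySem.Dict.contains])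
  -- w is no pronoun: the map lookup misses and every membership test is false
  simp only [List.mem_cons, List.not_mem_nil, or_false, not_or] at h1 h2 h3 h4
  have hget : pronounMap.get? w = none := by
    rw [PySem.Dict.get?_eq_none_iff_not_mem_keys,
        show pronounMap = PySem.Dict.mk
  [("i", "first_person_singular"),
   ("me", "first_person_singular"),
   ("my", "first_person_singular"),
   ("mine", "first_person_singular"),
   ("myself", "first_person_singular"),
   ("we", "first_person_plural"),
   ("us", "first_person_plural"),
   ("our", "first_person_plural"),
   ("ours", "first_person_plural"),
   ("ourselves", "first_person_plural"),
   ("you", "second_person"),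
   ("your", "second_person"),
   ("yours", "second_person"),
   ("yourself", "second_person"),
   ("yourselves", "second_person"),
   ("he", "third_person"),
   ("him", "third_person"),
   ("his", "third_person"),
   ("she", "third_person"),
   ("her", "third_person"),
   ("hers", "third_person"),
   ("they", "third_person"),
   ("them", "third_person"),
   ("their", "third_person"),
   ("theirs", "third_person"),
   ("themselves", "third_person"),
   ("it", "third_person"),
   ("its", "third_person")] from by decide]
    simp only [PySem.Dict.keys_mk, List.map_cons, List.map_nil, List.mem_cons,
      List.not_mem_nil, or_false, not_or]
    tauto
  unfold pronounStep
  rw [hget]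
  simp [h1.1, h1.2.1, h1.2.2.1, h1.2.2.2.1, h1.2.2.2.2, h2.1, h2.2.1, h2.2.2.1, h2.2.2.2.1, h2.2.2.2.2,
    h3.1, h3.2.1, h3.2.2.1, h3.2.2.2.1, h3.2.2.2.2, h4.1, h4.2.1, h4.2.2.1, h4.2.2.2.1, h4.2.2.2.2.1,
    h4.2.2.2.2.2.1, h4.2.2.2.2.2.2.1, h4.2.2.2.2.2.2.2.1, h4.2.2.2.2.2.2.2.2.1, h4.2.2.2.2.2.2.2.2.2.1,
    h4.2.2.2.2.2.2.2.2.2.2.1, h4.2.2.2.2.2.2.2.2.2.2.2.1, h4.2.2.2.2.2.2.2.2.2.2.2.2]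

-- B's whole loop from any dict of the invariant shape, as A's four sums
theorem fold_lit (ws : List String) : ∀ (a b c d : Int),
    (ws.foldl pronounStep (PySem.Dict.mk
      [("first_person_singular", a), ("first_person_plural", b),
       ("second_person", c), ("third_person", d)])).items =
    [("first_person_singular", a + (ws.map (fun w => if w ∈ ["i", "me", "my", "mine", "myself"] then (1 : Int) else 0)).sum),
     ("first_person_plural", b + (ws.map (fun w => if w ∈ ["we", "us", "our", "ours", "ourselves"] then (1 : Int) else 0)).sum),
     ("second_person", c + (ws.map (fun w => if w ∈ ["you", "your", "yours", "yourself", "yourselves"] then (1 : Int) else 0)).sum),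
     ("third_person", d + (ws.map (fun w => if w ∈ ["he", "him", "his", "she", "her", "hers", "they", "them", "their", "theirs", "themselves", "it", "its"] then (1 : Int) else 0)).sum)] := by
  induction ws with
  | nil => intro a b c d; simp
  | cons w ws ih =>
    intro a b c d
    rw [List.foldl_cons, pronounStep_lit, ih]
    simp [add_assoc]

-- ===== VERDICT (by name: the statement is the Claim_ definition above) =====
theorem analyze_pronouns_py_spec : Claim_equal_analyze_pronouns_py := by
  intro words _
  unfold Spec_analyze_pronouns_py analyze_pronouns_py analyze_pronouns_py_alt
  rw [show PySem.Dict.ofList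
      [("first_person_singular", (0 : Int)), ("first_person_plural", 0),
       ("second_person", 0), ("third_person", 0)] =
    PySem.Dict.mk
      [("first_person_singular", 0), ("first_person_plural", 0),
       ("second_person", 0), ("third_person", 0)] from by decide, fold_lit]
  simp
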